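-- pv_equiv track=rewrite | github.com/TomasBahnik/pslib | python/alp/cv03/commensurable.py | deli
-- ===== SOURCE A (Python) =====
-- def deli(x, y):
--     """ Return True kdyz x a y jsou soudelna cisla. """
--     if x < y:
--         x, y = y, x
--     zb = x % y
--     while zb != 0:
--         x = y
--         y = zb
--         zb = x % y
--     return y > 1
-- ===== SOURCE B (Python) =====
-- def deli(x, y):
--     """ Return True kdyz x a y jsou soudelna cisla. """
--     if x < y:
--         x, y = y, x
--     return _g(x, y) > 1
--
-- def _g(a, b):
--     r = a % b
--     if r == 0:
--         return b
--     return _g(b, r)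
-- ===== Notes on version B (the rewrite author's own statement) =====
-- stated objective: alternative
-- what changed: Replaces A's three-variable while loop (x, y, zb carried across iterations) with a tail-recursive helper g(a,b) that computes the remainder and recurses on (b, r); same Euclidean algorithm expressed as structural recursion instead of mutable loop state.
-- outside the precondition, e.g. on deli(0, 0): A raises ZeroDivisionError, B raises ZeroDivisionError
import Mathlib
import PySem

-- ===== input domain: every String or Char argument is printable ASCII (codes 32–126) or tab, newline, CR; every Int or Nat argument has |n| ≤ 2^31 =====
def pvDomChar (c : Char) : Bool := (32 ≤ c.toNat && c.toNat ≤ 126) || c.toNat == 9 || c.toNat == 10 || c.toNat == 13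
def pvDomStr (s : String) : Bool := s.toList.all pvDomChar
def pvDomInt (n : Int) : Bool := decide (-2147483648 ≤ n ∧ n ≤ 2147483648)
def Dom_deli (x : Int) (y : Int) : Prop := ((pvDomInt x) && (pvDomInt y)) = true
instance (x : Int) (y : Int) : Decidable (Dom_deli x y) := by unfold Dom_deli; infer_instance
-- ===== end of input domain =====

-- B re-expresses A's three-variable while loop as a tail-recursive helper g(a,b); return value equivalence on inputs where Python does not divide by zero.


-- remainder shrinks in magnitude (Python floor mod, any nonzero divisor); used for termination
theorem pvModNatAbsLt (a b : Int) (hb : b ≠ 0) : (PySem.Int.mod a b).natAbs < b.natAbs := by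
  rcases lt_or_gt_of_ne hb with h | h
  · have := PySem.Int.mod_neg_bounds a h; omega
  · have := PySem.Int.mod_nonneg a h; have := PySem.Int.mod_lt a h; omega

-- ===== PORT A =====
-- the while loop, state (x, y, zb) exactly as in A: while zb != 0: x, y, zb = y, zb, y % zb
def deliLoop (_x y zb : Int) : Int :=
  if h : zb = 0 then y
  else deliLoop y zb (PySem.Int.mod y zb)
termination_by zb.natAbs
decreasing_by exact pvModNatAbsLt y zb h

def deli (x : Int) (y : Int) : Bool :=
  let p := if x < y then (y, x) else (x, y)
  let zb := PySem.Int.mod p.1 p.2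
  decide (1 < deliLoop p.1 p.2 zb)

-- ===== PORT B =====
-- B's helper _g(a, b): r = a % b; if r == 0: return b; return _g(b, r)
def deliG (a b : Int) : Int :=
  let r := PySem.Int.mod a b
  if h : r = 0 then b
  else deliG b r
termination_by if b = 0 then a.natAbs + 1 else b.natAbs
decreasing_by
  rw [if_neg h]
  by_cases hb : b = 0
  · subst hb
    have hm : PySem.Int.mod a 0 = a := by simp [PySem.Int.mod]
    rw [if_pos rfl, hm]; omega
  · rw [if_neg hb]; exact pvModNatAbsLt a b hb

def deli_alt (x : Int) (y : Int) : Bool :=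
  let p := if x < y then (y, x) else (x, y)
  decide (1 < deliG p.1 p.2)

-- ===== PRECONDITION & SPEC =====
-- Pre_ excludes exactly the inputs where the Python A (and B) raise ZeroDivisionError: min(x, y) = 0
def Pre_deli (x : Int) (y : Int) : Prop := (if x < y then x else y) ≠ 0
instance (x : Int) (y : Int) : Decidable (Pre_deli x y) := by unfold Pre_deli; infer_instance
def pvWitness_deli : Int × Int := (12, 18)
def Spec_deli (x : Int) (y : Int) (out : Bool) : Prop := out = deli_alt x y
instance (x : Int) (y : Int) (out : Bool) : Decidable (Spec_deli x y out) := by unfold Spec_deli; infer_instance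

-- ===== CLAIM (what is proved, stated in full; the proofs are below) =====
def Claim_equal_deli : Prop := ∀ (x : Int) (y : Int), Dom_deli x y → Pre_deli x y → Spec_deli x y (deli x y)

-- ===== LEMMAS AND PROOFS =====

theorem pvLoopEqG (n : Nat) : ∀ (y x : Int), y ≠ 0 → y.natAbs ≤ n →
    deliLoop x y (PySem.Int.mod x y) = deliG x y := by
  induction n with
  | zero => intro y x hy hn; omega
  | succ n ih =>
    intro y x hy hn
    rw [deliLoop, deliG]
    by_cases h : PySem.Int.mod x y = 0
    · simp [h]
    · have hlt := pvModNatAbsLt x y hy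
      simp only [h, dif_neg, not_false_iff]
      exact ih _ y h (by omega)

-- ===== VERDICT (by name: the statement is the Claim_ definition above) =====
theorem deli_spec : Claim_equal_deli := by
  intro x y _ hpre
  unfold Spec_deli deli deli_alt
  unfold Pre_deli at hpre
  by_cases h : x < y <;>
    simp only [h, if_pos, if_neg, not_false_iff] at hpre ⊢ <;>
    rw [pvLoopEqG _ _ _ hpre (le_refl _)]
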